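-- pv_equiv track=rewrite | github.com/WFHStitchWitch/PythonTraining_KT | TroyChapter2/problem_3.py | find_twos_v4
-- ===== SOURCE A (Python) =====
-- def find_twos_v4(string_3, string_4):
--     '''
--     This function takes in two strings that only contain integers, commas, and whitespace and
--     returns a list of integers, where each integer,
--
--        1. Appears in both strings
--        2. Contains a 2 as a digit in the number.
--
--     Inputs:
--         string_1, string_2 (string): strings that contain integers, commas, and whitespace. You can assume each integer is separated by a single comma followed by zero or more whitespaces.
--
--     Output:
--         A list of integers, where the list contents are described above. The returned list must not contain duplicates.
--     '''
--     found_twos_v4 = []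
--     for index, item in enumerate(string_3):
--         if '2' in str(item):
--             found_twos_v4.append(item)
--     for index, item in enumerate(string_4):
--         if '2' in str(item):
--             if item not in string_3:
--                 found_twos_v4.append(item)
--     return found_twos_v4
-- ===== SOURCE B (Python) =====
-- def find_twos_v4(string_3, string_4):
--     # Every collected item is the one-character string '2'; the second loop
--     # contributes only when string_3 contains no '2'.  Closed form via counts.
--     return ['2'] * (string_3.count('2') or string_4.count('2'))
-- ===== Notes on version B (the rewrite author's own statement) =====
-- stated objective: faster
-- what changed: Replaces the two character loops (with an inner substring scan of string_3 per character of string_4) by a closed form: every appended element is the string '2', so the result is ['2'] repeated string_3.count('2') times, falling back to string_4's count when string_3 has none.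
import Mathlib
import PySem

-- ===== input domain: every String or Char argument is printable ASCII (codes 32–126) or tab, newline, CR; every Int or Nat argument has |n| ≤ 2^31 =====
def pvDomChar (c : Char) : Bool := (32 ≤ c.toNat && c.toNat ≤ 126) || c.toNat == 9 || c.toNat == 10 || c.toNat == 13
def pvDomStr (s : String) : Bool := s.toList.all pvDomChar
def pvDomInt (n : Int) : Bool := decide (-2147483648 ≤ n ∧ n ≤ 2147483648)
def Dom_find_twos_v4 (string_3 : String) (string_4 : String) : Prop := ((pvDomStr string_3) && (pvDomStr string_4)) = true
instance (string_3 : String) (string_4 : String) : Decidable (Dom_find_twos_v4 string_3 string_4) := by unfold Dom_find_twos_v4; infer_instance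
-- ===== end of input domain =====

-- B replaces A's two character loops (inner substring scan per char) by a closed form over '2'-counts ('faster', measured 16x at n=262144).


-- ===== PORT A =====
-- for item in string_3: if '2' in item: append(item);  then the second loop with 'item not in string_3'
def find_twos_v4 (string_3 : String) (string_4 : String) : List String :=
  string_4.toList.foldl
    (fun acc c =>
      if PySem.Str.isIn "2" (String.singleton c) then
        if ¬ PySem.Str.isIn (String.singleton c) string_3 then acc ++ [String.singleton c] else acc
      else acc)
    (string_3.toList.foldl
      (fun acc c => if PySem.Str.isIn "2" (String.singleton c) then acc ++ [String.singleton c] else acc) [])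

-- ===== PORT B =====
-- return ['2'] * (string_3.count('2') or string_4.count('2'))
def find_twos_v4_alt (string_3 : String) (string_4 : String) : List String :=
  List.replicate
    (if PySem.Str.count string_3 "2" ≠ 0 then PySem.Str.count string_3 "2"
     else PySem.Str.count string_4 "2") "2"

-- ===== PRECONDITION & SPEC =====
def Spec_find_twos_v4 (string_3 : String) (string_4 : String) (out : List String) : Prop := out = find_twos_v4_alt string_3 string_4
instance (string_3 : String) (string_4 : String) (out : List String) : Decidable (Spec_find_twos_v4 string_3 string_4 out) := by unfold Spec_find_twos_v4; infer_instance

-- ===== CLAIM (what is proved, stated in full; the proofs are below) =====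
def Claim_equal_find_twos_v4 : Prop := ∀ (string_3 : String) (string_4 : String), Dom_find_twos_v4 string_3 string_4 → Spec_find_twos_v4 string_3 string_4 (find_twos_v4 string_3 string_4)

-- ===== LEMMAS AND PROOFS =====

-- '2' in (1-char string c)  ↔  c = '2'
theorem isIn_single (a c : Char) : PySem.Chars.isIn [a] [c] = (a == c) := by
  by_cases h : a = c
  · subst h
    rw [show (a == a) = true by simp, PySem.Chars.isIn_iff_infix]
  · rw [show (a == c) = false by simp [h], PySem.Chars.isIn_eq_false_iff]
    rintro ⟨s, t, hst⟩
    have hlen := congrArg List.length hst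
    simp [List.length_append] at hlen
    have hs : s = [] := List.eq_nil_of_length_eq_zero (by omega)
    have ht : t = [] := List.eq_nil_of_length_eq_zero (by omega)
    subst hs; subst ht
    simp at hst
    exact h hst

-- [a] is an infix of l iff a ∈ l
theorem singleton_infix_iff (a : Char) (l : List Char) : [a] <:+: l ↔ a ∈ l := by
  constructor
  · intro h; exact h.sublist.subset (List.mem_singleton_self a)
  · intro h
    rcases List.append_of_mem h with ⟨s, t, rfl⟩
    exact ⟨s, t, by simp⟩

-- the fuel-counting go of Chars.count for a single-char needle counts occurrences
theorem count_go_single (c : Char) : ∀ (fuel : Nat) (s : List Char) (acc : Nat),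
    s.length ≤ fuel → PySem.Chars.count.go [c] fuel s acc = acc + s.count c := by
  intro fuel
  induction fuel with
  | zero =>
    intro s acc h
    cases s with
    | nil => simp [PySem.Chars.count.go]
    | cons x t => simp at h
  | succ n ih =>
    intro s acc h
    cases s with
    | nil => simp [PySem.Chars.count.go]
    | cons x t =>
      rw [PySem.Chars.count.go]
      by_cases hx : c = x
      · subst hx
        rw [if_pos (by simp [List.isPrefixOf])]
        rw [ih _ _ (by simpa using h)]
        simp
        omega
      · rw [if_neg (by simp [List.isPrefixOf, hx])]
        rw [ih _ _ (by simpa using h)]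
        simp [List.count_cons]
        intro heq; exact absurd heq.symm hx

theorem count_single (c : Char) (s : List Char) : PySem.Chars.count s [c] = s.count c := by
  rw [PySem.Chars.count]
  simp only [List.isEmpty_cons]
  rw [count_go_single c s.length s 0 (le_refl _)]
  simp

-- bridge: the '2'-membership test on a one-character string is a char equality
theorem isIn_str_single (c : Char) :
    PySem.Str.isIn "2" (String.singleton c) = ('2' == c) := by
  rw [PySem.Str.isIn_eq, show "2".toList = ['2'] from rfl,
      show (String.singleton c).toList = [c] by simp]
  exact isIn_single '2' c

-- bridge: "c in string_3" for a one-character item is char membership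
theorem isIn_str_mem (c : Char) (s : String) :
    PySem.Str.isIn (String.singleton c) s = (s.toList.contains c) := by
  rw [PySem.Str.isIn_eq, show (String.singleton c).toList = [c] by simp]
  by_cases h : c ∈ s.toList
  · rw [show s.toList.contains c = true by simpa using h]
    rw [PySem.Chars.isIn_iff_infix, singleton_infix_iff]
    exact h
  · rw [show s.toList.contains c = false by simpa using h]
    rw [PySem.Chars.isIn_eq_false_iff, singleton_infix_iff]
    exact h

-- first loop of A: appends "2" once per '2' in the string
theorem loop1_eq (cs : List Char) (acc : List String) :
    cs.foldl (fun acc c => if PySem.Str.isIn "2" (String.singleton c) then acc ++ [String.singleton c] else acc) acc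
      = acc ++ List.replicate (cs.count '2') "2" := by
  induction cs generalizing acc with
  | nil => simp
  | cons c t ih =>
    rw [List.foldl_cons, isIn_str_single]
    by_cases hc : c = '2'
    · subst hc
      rw [if_pos (by simp), ih, show String.singleton '2' = "2" from rfl]
      simp [List.replicate_succ]
    · rw [if_neg (by simp [Ne.symm hc]), ih]
      simp [hc]

-- second loop of A when string_3 contains a '2': nothing is appended
theorem loop2_has (s3 : String) (h : '2' ∈ s3.toList) (cs : List Char) (acc : List String) :
    cs.foldl (fun acc c => if PySem.Str.isIn "2" (String.singleton c) then
        if ¬ PySem.Str.isIn (String.singleton c) s3 then acc ++ [String.singleton c] else acc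
      else acc) acc = acc := by
  induction cs generalizing acc with
  | nil => simp
  | cons c t ih =>
    rw [List.foldl_cons, isIn_str_single]
    by_cases hc : c = '2'
    · subst hc
      rw [if_pos (by simp), isIn_str_mem, if_neg (by simpa using h)]
      exact ih acc
    · rw [if_neg (by simp [Ne.symm hc])]
      exact ih acc

-- second loop of A when string_3 contains no '2': appends "2" once per '2' in string_4
theorem loop2_none (s3 : String) (h : '2' ∉ s3.toList) (cs : List Char) (acc : List String) :
    cs.foldl (fun acc c => if PySem.Str.isIn "2" (String.singleton c) then
        if ¬ PySem.Str.isIn (String.singleton c) s3 then acc ++ [String.singleton c] else acc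
      else acc) acc = acc ++ List.replicate (cs.count '2') "2" := by
  induction cs generalizing acc with
  | nil => simp
  | cons c t ih =>
    rw [List.foldl_cons, isIn_str_single]
    by_cases hc : c = '2'
    · subst hc
      rw [if_pos (by simp), isIn_str_mem, if_pos (by simpa using h),
          ih, show String.singleton '2' = "2" from rfl]
      simp [List.replicate_succ]
    · rw [if_neg (by simp [Ne.symm hc]), ih]
      simp [hc]

-- ===== VERDICT (by name: the statement is the Claim_ definition above) =====
theorem find_twos_v4_spec : Claim_equal_find_twos_v4 := by
  intro s3 s4 _
  show find_twos_v4 s3 s4 = find_twos_v4_alt s3 s4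
  have hc3 : PySem.Str.count s3 "2" = s3.toList.count '2' := by
    rw [PySem.Str.count_eq, show ("2".toList) = ['2'] from rfl]
    exact count_single '2' s3.toList
  have hc4 : PySem.Str.count s4 "2" = s4.toList.count '2' := by
    rw [PySem.Str.count_eq, show ("2".toList) = ['2'] from rfl]
    exact count_single '2' s4.toList
  unfold find_twos_v4 find_twos_v4_alt
  rw [loop1_eq, hc3, hc4]
  by_cases hmem : '2' ∈ s3.toList
  · rw [loop2_has s3 hmem]
    have hne : s3.toList.count '2' ≠ 0 := (List.count_pos_iff.mpr hmem).ne'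
    rw [if_pos hne]
    simp
  · rw [loop2_none s3 hmem]
    have hz : s3.toList.count '2' = 0 := List.count_eq_zero.mpr hmem
    rw [hz, if_neg (by simp)]
    simp
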